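-- pv_equiv track=rewrite | github.com/Javoxir200/PythonHW | HW4/task22.py | blueberryc
-- ===== SOURCE A (Python) =====
-- from collections import deque, Counter
--
-- def blueberryc(lst: list) -> int:
--     res: int = 0
--     deq = deque(lst)
--     for _ in range(0, len(lst)):
--         deq.rotate(-1)
--         s: int = sum(list(deq)[:3:])
--         if res < s:
--             res = s
--     return res
-- ===== SOURCE B (Python) =====
-- def blueberryc(lst: list) -> int:
--     n = len(lst)
--     if n == 0:
--         return 0
--     w = min(3, n)
--     ext = lst + lst[:w - 1]
--     s = sum(ext[:w])
--     best = 0 if s < 0 else s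
--     for out_, in_ in zip(ext, ext[w:]):
--         s += in_ - out_
--         if s > best:
--             best = s
--     return best
-- ===== Notes on version B (the rewrite author's own statement) =====
-- stated objective: faster
-- what changed: Replaces the per-iteration deque rotation plus full list copy and re-summation with a single circular sliding-window pass that maintains a running window sum.
import Mathlib
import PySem

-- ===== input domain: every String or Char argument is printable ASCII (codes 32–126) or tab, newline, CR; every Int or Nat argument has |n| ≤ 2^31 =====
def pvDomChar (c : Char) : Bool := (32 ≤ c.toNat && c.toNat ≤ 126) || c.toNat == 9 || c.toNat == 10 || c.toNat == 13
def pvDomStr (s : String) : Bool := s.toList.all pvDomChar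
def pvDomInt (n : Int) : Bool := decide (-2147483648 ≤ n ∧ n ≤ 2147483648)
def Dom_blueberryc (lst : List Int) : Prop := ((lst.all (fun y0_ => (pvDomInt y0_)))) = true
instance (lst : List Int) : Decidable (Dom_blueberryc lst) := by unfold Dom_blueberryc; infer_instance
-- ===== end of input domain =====

-- B replaces A's rotate-copy-resum loop by a single circular sliding-window pass (objective: faster).

-- ===== PORT A =====
-- for _ in range(0, len(lst)): deq.rotate(-1); s = sum(list(deq)[:3:]); if res < s: res = s
def blueberryc (lst : List Int) : Int :=
  ((List.range lst.length).foldl (fun st _ =>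
      let deq' := st.2.drop 1 ++ st.2.take 1   -- deq.rotate(-1): first element moves to the end
      let s := (deq'.take 3).sum               -- sum(list(deq)[:3:])
      (if st.1 < s then s else st.1, deq'))
    ((0 : Int), lst)).1

-- ===== PORT B =====
def blueberryc_alt (lst : List Int) : Int :=
  let n := lst.length
  if n = 0 then 0 else
    let w := min 3 n
    let ext := lst ++ lst.take (w - 1)
    let s := (ext.take w).sum
    let best := if s < 0 then 0 else s
    ((ext.zip (ext.drop w)).foldl (fun st p =>
        let s := st.1 + p.2 - p.1
        (s, if s > st.2 then s else st.2)) (s, best)).2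

-- ===== PRECONDITION & SPEC =====
def Spec_blueberryc (lst : List Int) (out : Int) : Prop := out = blueberryc_alt lst
instance (lst : List Int) (out : Int) : Decidable (Spec_blueberryc lst out) := by unfold Spec_blueberryc; infer_instance

-- ===== CLAIM (what is proved, stated in full; the proofs are below) =====
def Claim_equal_blueberryc : Prop := ∀ (lst : List Int), Dom_blueberryc lst → Spec_blueberryc lst (blueberryc lst)

-- ===== LEMMAS AND PROOFS =====

-- circular window sum starting at rotation k (what A's k-th iteration sums)
def pvW (lst : List Int) (k : Nat) : Int := ((lst.rotate k).take 3).sum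

-- window sum at position j of B's extended list
def pvS (lst : List Int) (j : Nat) : Int :=
  (((lst ++ lst.take (min 3 lst.length - 1)).drop j).take (min 3 lst.length)).sum

theorem pv_ifmax (a b : Int) : (if a < b then b else a) = max a b := by
  rw [max_def]; split <;> split <;> omega

theorem pv_rot1 (d : List Int) : d.drop 1 ++ d.take 1 = d.rotate 1 := by
  cases d with
  | nil => simp
  | cons a t => simp [List.rotate_cons_succ]

-- the s-values A's loop produces, starting from deque d, for m iterations
def pvASums (d : List Int) : Nat → List Int
  | 0 => []
  | m + 1 =>
      let d' := d.drop 1 ++ d.take 1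
      ((d'.take 3).sum) :: pvASums d' m

theorem pv_afold (L : List Nat) : ∀ (res : Int) (d : List Int),
    ((L.foldl (fun st (_ : Nat) =>
        let deq' := st.2.drop 1 ++ st.2.take 1
        let s := (deq'.take 3).sum
        (if st.1 < s then s else st.1, deq')) (res, d)).1)
      = (pvASums d L.length).foldl max res := by
  induction L with
  | nil => intro res d; simp [pvASums]
  | cons x L ih =>
      intro res d
      simp only [List.foldl_cons, List.length_cons, pvASums, List.foldl]
      rw [ih, pv_ifmax]

theorem pv_aSums_eq (m : Nat) : ∀ (k : Nat) (lst : List Int),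
    pvASums (lst.rotate k) m = (List.range m).map (fun i => pvW lst (k + 1 + i)) := by
  induction m with
  | zero => intro k lst; simp [pvASums]
  | succ m ih =>
      intro k lst
      simp only [pvASums, pv_rot1, List.rotate_rotate]
      rw [List.range_succ_eq_map, List.map_cons, List.map_map]
      congr 1
      rw [ih (k + 1) lst]
      apply List.map_congr_left
      intro i _
      have : k + 1 + 1 + i = k + 1 + (i + 1) := by omega
      simp [Function.comp, this]

-- sliding-window step: moving the window one position to the right
theorem pv_slide (e : List Int) (w j : Nat) (hw : 1 ≤ w) (h : j + w < e.length) :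
    ((e.drop (j + 1)).take w).sum
      = ((e.drop j).take w).sum + e[j + w]'h - e[j]'(by omega) := by
  obtain ⟨v, rfl⟩ : ∃ v, w = v + 1 := ⟨w - 1, by omega⟩
  have h1 : (e.drop (j + 1)).take (v + 1)
      = (e.drop (j + 1)).take v ++ [e[j + (v + 1)]'h] := by
    rw [List.take_add_one]
    congr 1
    rw [List.getElem?_drop, List.getElem?_eq_getElem (by omega)]
    simp only [Option.toList_some]
    congr 2
    omega
  have h2 : (e.drop j).take (v + 1)
      = e[j]'(by omega) :: (e.drop (j + 1)).take v := by
    rw [List.drop_eq_getElem_cons (by omega : j < e.length)]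
    rfl
  rw [h1, h2]
  simp [List.sum_append]
  ring

theorem pv_bfold (e : List Int) (w : Nat) (hw : 1 ≤ w) : ∀ (m j : Nat) (best : Int),
    m = e.length - (j + w) →
    (((e.drop j).zip (e.drop (j + w))).foldl (fun st p =>
        let s := st.1 + p.2 - p.1
        (s, if s > st.2 then s else st.2)) (((e.drop j).take w).sum, best)).2
      = ((List.range m).map (fun i => ((e.drop (j + 1 + i)).take w).sum)).foldl max best := by
  intro m
  induction m with
  | zero =>
      intro j best hm
      have : e.drop (j + w) = [] := List.drop_eq_nil_of_le (by omega)
      simp [this]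
  | succ m ih =>
      intro j best hm
      have hlt : j + w < e.length := by omega
      have hj : j < e.length := by omega
      have hz : (e.drop j).zip (e.drop (j + w))
          = (e[j]'hj, e[j + w]'hlt) :: ((e.drop (j + 1)).zip (e.drop (j + 1 + w))) := by
        rw [List.drop_eq_getElem_cons hj, List.drop_eq_getElem_cons hlt, List.zip_cons_cons]
        congr 3
        omega
      rw [hz, List.foldl_cons]
      dsimp only
      rw [← pv_slide e w j hw hlt]
      rw [pv_ifmax best (((e.drop (j + 1)).take w).sum)]
      rw [ih (j + 1) (max best (((e.drop (j + 1)).take w).sum)) (by omega)]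
      rw [List.range_succ_eq_map, List.map_cons, List.map_map, List.foldl_cons]
      rw [show j + 1 + 0 = j + 1 by omega]
      congr 1
      apply List.map_congr_left
      intro i _
      have h1 : j + 1 + 1 + i = j + 1 + (i + 1) := by omega
      simp [Function.comp, h1]

theorem pv_foldl_max (l : List Int) : ∀ (a x : Int),
    l.foldl max (max a x) = max (l.foldl max a) x := by
  induction l with
  | nil => intro a x; rfl
  | cons b l ih =>
      intro a x
      simp only [List.foldl_cons]
      rw [max_right_comm, ih]

-- bridge: A's k-th window equals B's window at position k, for 1 ≤ k < n
theorem pvW_eq_S (lst : List Int) (k : Nat) (hn : 1 ≤ lst.length) (hk : k < lst.length) :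
    pvW lst k = pvS lst k := by
  unfold pvW pvS
  rw [List.rotate_eq_drop_append_take (by omega : k ≤ lst.length)]
  rw [List.take_append, List.drop_append]
  rw [show k - lst.length = 0 by omega, List.drop_zero, List.take_append]
  congr 2
  · apply List.take_eq_take_iff.mpr
    simp only [List.length_drop]
    omega
  · rw [List.take_take, List.take_take]
    congr 1
    simp only [List.length_drop]
    omega

theorem pvW_len_eq_S0 (lst : List Int) (_hn : 1 ≤ lst.length) :
    pvW lst lst.length = pvS lst 0 := by
  unfold pvW pvS
  rw [List.rotate_length, List.drop_zero, List.take_append]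
  rw [show min 3 lst.length - lst.length = 0 by omega]
  simp only [List.take_zero, List.append_nil]
  congr 1
  apply List.take_eq_take_iff.mpr
  omega

-- ===== VERDICT (by name: the statement is the Claim_ definition above) =====
theorem blueberryc_spec : Claim_equal_blueberryc := by
  intro lst _
  unfold Spec_blueberryc
  by_cases h0 : lst.length = 0
  · rw [List.length_eq_zero_iff.mp h0]
    rfl
  · have hn : 1 ≤ lst.length := by omega
    set n := lst.length with hnn
    -- A side
    have hA : blueberryc lst = ((List.range n).map (fun i => pvW lst (1 + i))).foldl max 0 := by
      have h := pv_aSums_eq n 0 lst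
      rw [List.rotate_zero] at h
      unfold blueberryc
      rw [pv_afold, List.length_range, h]
    -- B side
    have hw : 1 ≤ min 3 n := by omega
    have hlen : (lst ++ lst.take (min 3 n - 1)).length = n + (min 3 n - 1) := by
      simp only [List.length_append, List.length_take]
      omega
    have hB : blueberryc_alt lst
        = ((List.range (n - 1)).map (fun i => pvS lst (1 + i))).foldl max
            (max 0 (pvS lst 0)) := by
      have hbf := pv_bfold (lst ++ lst.take (min 3 n - 1)) (min 3 n) hw (n - 1) 0
          (max 0 (((lst ++ lst.take (min 3 n - 1)).take (min 3 n)).sum))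
          (by rw [hlen]; omega)
      simp only [Nat.zero_add, List.drop_zero] at hbf
      unfold blueberryc_alt
      simp only [← hnn, if_neg h0]
      rw [show (if ((( lst ++ lst.take (min 3 n - 1)).take (min 3 n)).sum) < 0 then (0:Int)
            else (((lst ++ lst.take (min 3 n - 1)).take (min 3 n)).sum))
          = max 0 (((lst ++ lst.take (min 3 n - 1)).take (min 3 n)).sum) by
        rw [max_def]; split <;> split <;> omega]
      rw [hbf]
      rfl
    rw [hA, hB]
    -- turn both into folds over pvS-lists and compare
    have hmap : (List.range n).map (fun i => pvW lst (1 + i))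
        = (List.range (n - 1)).map (fun i => pvS lst (1 + i)) ++ [pvS lst 0] := by
      have : n = (n - 1) + 1 := by omega
      rw [this, List.range_succ, List.map_append]
      congr 1
      · apply List.map_congr_left
        intro i hi
        simp only [List.mem_range] at hi
        exact pvW_eq_S lst (1 + i) hn (by omega)
      · simp only [List.map_cons, List.map_nil]
        rw [show 1 + (n - 1) = n by omega]
        rw [pvW_len_eq_S0 lst hn]
    rw [hmap, List.foldl_append]
    simp only [List.foldl_cons, List.foldl_nil]
    rw [← pv_foldl_max, max_comm]
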